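-- pv_equiv track=rewrite | github.com/martincesnovar/racunalnistvo | Tomo/problem-nahrbtnika/01_nahrbtnik.py | pomozna
-- ===== SOURCE A (Python) =====
-- def pomozna(predmeti, s, n, v, c):
--     if n == 0:
--         return [[]]
--     v0 = v - predmeti[n - 1][0]
--     c0 = c - predmeti[n - 1][1]
--     resitve = []
--
--     if (v, c) in s[n - 1]:
--         resitve0 = pomozna(predmeti, s, n - 1, v, c)
--         for resitev in resitve0:
--             resitev.append(0)
--         resitve += resitve0
--
--     if (v0, c0) in s[n - 1]:
--         v, c = v0, c0
--         resitve1 = pomozna(predmeti, s, n - 1, v0, c0)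
--         for resitev in resitve1:
--             resitev.append(1)
--         resitve += resitve1
--
--     return resitve
-- ===== SOURCE B (Python) =====
-- def pomozna(predmeti, s, n, v, c):
--     if n == 0:
--         return [[]]
--     worklist = [((v, c), [])]
--     for i in range(n, 0, -1):
--         if not worklist:
--             return []
--         vi, ci = predmeti[i - 1][0], predmeti[i - 1][1]
--         level = s[i - 1]
--         nxt = []
--         for (sv, sc), sol in worklist:
--             if (sv, sc) in level:
--                 nxt.append(((sv, sc), [0] + sol))
--             if (sv - vi, sc - ci) in level:
--                 nxt.append(((sv - vi, sc - ci), [1] + sol))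
--         worklist = nxt
--     return [sol for _, sol in worklist]
-- ===== Notes on version B (the rewrite author's own statement) =====
-- stated objective: alternative
-- what changed: Replaces the recursive DFS backtracking over the DP table by an iterative level-wise worklist expansion: pairs of (state, partial solution) are expanded from level n down to 1 with choice bits prepended, yielding the same solutions in the same order without recursion.
-- outside the precondition, e.g. on pomozna([(1, 2), (3, 4)], [set(), set()], -1, 0, 0): A returns [], B returns [[]]; on pomozna([(9,), (1, 2)], [set(), set()], 2, 0, 0): A returns [], B returns []
import Mathlib
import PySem

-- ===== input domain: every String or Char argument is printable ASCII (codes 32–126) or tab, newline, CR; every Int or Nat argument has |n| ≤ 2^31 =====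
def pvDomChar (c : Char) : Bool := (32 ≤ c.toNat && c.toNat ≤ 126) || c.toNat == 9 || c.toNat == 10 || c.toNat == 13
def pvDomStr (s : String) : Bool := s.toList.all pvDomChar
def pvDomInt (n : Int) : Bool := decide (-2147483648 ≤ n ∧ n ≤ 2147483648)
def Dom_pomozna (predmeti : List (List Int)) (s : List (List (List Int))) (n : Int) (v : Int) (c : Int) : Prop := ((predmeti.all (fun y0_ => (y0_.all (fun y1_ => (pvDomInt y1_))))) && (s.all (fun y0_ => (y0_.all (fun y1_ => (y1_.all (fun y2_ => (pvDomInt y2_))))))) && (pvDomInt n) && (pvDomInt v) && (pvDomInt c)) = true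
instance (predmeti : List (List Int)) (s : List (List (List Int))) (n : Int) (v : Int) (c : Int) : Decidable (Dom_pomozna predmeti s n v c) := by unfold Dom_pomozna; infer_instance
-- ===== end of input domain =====

-- B replaces A's recursive DFS over the DP table by an iterative level-wise worklist expansion
-- (states paired with partial solutions, choice bits prepended); same return value on Pre_.

-- ===== PORT A =====
def pomozna (predmeti : List (List Int)) (s : List (List (List Int))) (n : Int) (v : Int) (c : Int) : List (List Int) :=
  if n == 0 then [[]]
  else
    match hrow : PySem.List.pyGet? predmeti (n - 1) with
    | none => []  -- IndexError (excluded by Pre_)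
    | some row =>
      match PySem.List.pyGet? row 0, PySem.List.pyGet? row 1 with
      | some p0, some p1 =>
        let v0 := v - p0
        let c0 := c - p1
        match PySem.List.pyGet? s (n - 1) with
        | none => []  -- IndexError (excluded by Pre_)
        | some lvl =>
          let resitve : List (List Int) := []
          let resitve :=
            if lvl.contains [v, c] then
              resitve ++ (pomozna predmeti s (n - 1) v c).map (fun r => r ++ [0])
            else resitve
          let resitve :=
            if lvl.contains [v0, c0] then
              resitve ++ (pomozna predmeti s (n - 1) v0 c0).map (fun r => r ++ [1])
            else resitve
          resitve
      | _, _ => []  -- IndexError (excluded by Pre_)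
termination_by (n + predmeti.length + 1).toNat
decreasing_by
  all_goals
    have hin : PySem.Raise.InRange predmeti.length (n - 1) := by
      by_contra hkn
      rw [← PySem.List.pyGet?_eq_none_iff] at hkn
      simp [hkn] at hrow
    unfold PySem.Raise.InRange at hin
    omega

-- ===== PORT B =====
-- one level of the worklist expansion: the inner `for (sv, sc), sol in worklist` loop of Source B
def bStep (vi : Int) (ci : Int) (lvl : List (List Int)) (w : List ((Int × Int) × List Int)) : List ((Int × Int) × List Int) :=
  w.foldl (fun nxt e =>
    let nxt := if lvl.contains [e.1.1, e.1.2] then nxt ++ [((e.1.1, e.1.2), 0 :: e.2)] else nxt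
    let nxt := if lvl.contains [e.1.1 - vi, e.1.2 - ci] then nxt ++ [((e.1.1 - vi, e.1.2 - ci), 1 :: e.2)] else nxt
    nxt) []

-- the `for i in range(n, 0, -1)` loop of Source B, fuel = current i
-- (each `Option.elim` is the none/some case split of one Python index access:
--  none = IndexError, excluded by Pre_)
def bLoop (predmeti : List (List Int)) (s : List (List (List Int))) : Nat → List ((Int × Int) × List Int) → List (List Int)
  | 0, w => w.map (fun e => e.2)
  | i + 1, w =>
    if w.isEmpty then []
    else
      (PySem.List.pyGet? predmeti (i : Int)).elim [] (fun row =>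
        (PySem.List.pyGet? row 0).elim [] (fun vi =>
          (PySem.List.pyGet? row 1).elim [] (fun ci =>
            (PySem.List.pyGet? s (i : Int)).elim [] (fun lvl =>
              bLoop predmeti s i (bStep vi ci lvl w)))))

def pomozna_alt (predmeti : List (List Int)) (s : List (List (List Int))) (n : Int) (v : Int) (c : Int) : List (List Int) :=
  if n == 0 then [[]]
  else bLoop predmeti s n.toNat [((v, c), [])]

-- ===== PRECONDITION & SPEC =====
-- Pre_ restricts to the natural domain of the DP-table enumeration: 0 ≤ n, the table rows
-- s[0..n-1] exist and the item rows predmeti[0..n-1] each have the two entries the search reads;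
-- outside it the values A still returns arise from negative-index wraparound or from short item
-- rows that A's search happens never to reach (excluded examples in the claim's cites).
def Pre_pomozna (predmeti : List (List Int)) (s : List (List (List Int))) (n : Int) (v : Int) (c : Int) : Prop :=
  0 ≤ n ∧ n.toNat ≤ predmeti.length ∧ n.toNat ≤ s.length ∧
    ∀ row ∈ predmeti.take n.toNat, 2 ≤ row.length
instance (predmeti : List (List Int)) (s : List (List (List Int))) (n : Int) (v : Int) (c : Int) : Decidable (Pre_pomozna predmeti s n v c) := by unfold Pre_pomozna; infer_instance

def pvWitness_pomozna : List (List Int) × List (List (List Int)) × Int × Int × Int :=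
  ([[1, 1]], [[[1, 1]]], 1, 1, 1)

def Spec_pomozna (predmeti : List (List Int)) (s : List (List (List Int))) (n : Int) (v : Int) (c : Int) (out : List (List Int)) : Prop := out = pomozna_alt predmeti s n v c
instance (predmeti : List (List Int)) (s : List (List (List Int))) (n : Int) (v : Int) (c : Int) (out : List (List Int)) : Decidable (Spec_pomozna predmeti s n v c out) := by unfold Spec_pomozna; infer_instance

-- ===== CLAIM (what is proved, stated in full; the proofs are below) =====
def Claim_equal_pomozna : Prop := ∀ (predmeti : List (List Int)) (s : List (List (List Int))) (n : Int) (v : Int) (c : Int), Dom_pomozna predmeti s n v c → Pre_pomozna predmeti s n v c → Spec_pomozna predmeti s n v c (pomozna predmeti s n v c)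

-- ===== LEMMAS AND PROOFS =====

-- the per-element children of one worklist entry, for the flatMap view of bStep
def bChildren (vi : Int) (ci : Int) (lvl : List (List Int)) (e : (Int × Int) × List Int) : List ((Int × Int) × List Int) :=
  (if lvl.contains [e.1.1, e.1.2] then [((e.1.1, e.1.2), 0 :: e.2)] else []) ++
  (if lvl.contains [e.1.1 - vi, e.1.2 - ci] then [((e.1.1 - vi, e.1.2 - ci), 1 :: e.2)] else [])

theorem bStep_eq_flatMap (vi ci : Int) (lvl : List (List Int)) (w : List ((Int × Int) × List Int)) :
    bStep vi ci lvl w = w.flatMap (bChildren vi ci lvl) := by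
  unfold bStep
  have h : (fun (nxt : List ((Int × Int) × List Int)) e =>
      let nxt := if lvl.contains [e.1.1, e.1.2] then nxt ++ [((e.1.1, e.1.2), 0 :: e.2)] else nxt
      let nxt := if lvl.contains [e.1.1 - vi, e.1.2 - ci] then nxt ++ [((e.1.1 - vi, e.1.2 - ci), 1 :: e.2)] else nxt
      nxt)
      = fun nxt e => nxt ++ bChildren vi ci lvl e := by
    funext nxt e
    unfold bChildren
    split_ifs <;> simp
  rw [h, PySem.List.foldl_append_eq_flatMap]
  simp

-- A's recursion unfolded one level: pomozna at n = i+1 in terms of pomozna at i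
theorem pomozna_succ (predmeti : List (List Int)) (s : List (List (List Int))) (i : Nat) (sv sc : Int) :
    pomozna predmeti s ((i + 1 : Nat) : Int) sv sc =
      (match PySem.List.pyGet? predmeti (i : Int) with
      | none => []
      | some row =>
        match PySem.List.pyGet? row 0, PySem.List.pyGet? row 1 with
        | some p0, some p1 =>
          (match PySem.List.pyGet? s (i : Int) with
          | none => []
          | some lvl =>
            (if lvl.contains [sv, sc] then
              (pomozna predmeti s (i : Int) sv sc).map (fun r => r ++ [0]) else []) ++
            (if lvl.contains [sv - p0, sc - p1] then
              (pomozna predmeti s (i : Int) (sv - p0) (sc - p1)).map (fun r => r ++ [1]) else []))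
        | _, _ => []) := by
  have hcast : ((i + 1 : Nat) : Int) - 1 = (i : Int) := by push_cast; ring
  rw [pomozna.eq_def]
  rw [if_neg (by simp only [beq_iff_eq]; push_cast; omega)]
  split
  · next hrow' =>
    rw [hcast] at hrow'
    rw [hrow']
  · next row hrow' =>
    rw [hcast] at hrow'
    simp only [hcast, hrow']
    cases h0 : PySem.List.pyGet? row 0 with
    | none => cases PySem.List.pyGet? row 1 <;> rfl
    | some p0 =>
      cases h1 : PySem.List.pyGet? row 1 with
      | none => rfl
      | some p1 =>
        cases hl : PySem.List.pyGet? s (i : Int) with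
        | none => rfl
        | some lvl =>
          dsimp only
          split_ifs <;> simp

-- the worklist invariant: running the loop from level i on worklist w produces, in order,
-- for each entry the solutions of A's recursion from that entry's state, with the entry's
-- partial solution appended
theorem bLoop_eq_flatMap_pomozna (predmeti : List (List Int)) (s : List (List (List Int)))
    (i : Nat) (w : List ((Int × Int) × List Int)) :
    bLoop predmeti s i w
      = w.flatMap (fun e => (pomozna predmeti s (i : Int) e.1.1 e.1.2).map (fun r => r ++ e.2)) := by
  induction i generalizing w with
  | zero =>
    unfold pomozna
    simp only [bLoop]
    induction w with
    | nil => rfl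
    | cons a t iht => simp_all
  | succ i ih =>
    unfold bLoop
    split
    · next hw => simp [List.isEmpty_iff.mp hw]
    · next hw =>
      cases hrow : PySem.List.pyGet? predmeti (i : Int) with
      | none =>
        simp only [Option.elim_none]
        symm
        simp only [List.flatMap_eq_nil_iff]
        intro e hm
        rw [pomozna_succ]
        simp [hrow]
      | some row =>
        simp only [Option.elim_some]
        cases hv : PySem.List.pyGet? row 0 with
        | none =>
          simp only [Option.elim_none]
          symm
          simp only [List.flatMap_eq_nil_iff]
          intro e hm
          rw [pomozna_succ]
          simp [hrow, hv]
        | some vi =>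
          simp only [Option.elim_some]
          cases hc : PySem.List.pyGet? row 1 with
          | none =>
          simp only [Option.elim_none]
          symm
          simp only [List.flatMap_eq_nil_iff]
          intro e hm
          rw [pomozna_succ]
          simp [hrow, hv, hc]
          | some ci =>
            simp only [Option.elim_some]
            cases hlvl : PySem.List.pyGet? s (i : Int) with
            | none =>
          simp only [Option.elim_none]
          symm
          simp only [List.flatMap_eq_nil_iff]
          intro e hm
          rw [pomozna_succ]
          simp [hrow, hv, hc, hlvl]
            | some lvl =>
              simp only [Option.elim_some]
              rw [ih, bStep_eq_flatMap, List.flatMap_assoc]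
              congr 1
              funext e
              rw [pomozna_succ]
              simp only [hrow, hv, hc, hlvl]
              unfold bChildren
              split_ifs <;> simp [Function.comp_def, List.append_assoc]

-- ===== VERDICT (by name: the statement is the Claim_ definition above) =====
theorem pomozna_spec : Claim_equal_pomozna := by
  intro predmeti s n v c _ hpre
  unfold Spec_pomozna pomozna_alt
  by_cases hn : n = 0
  · subst hn
    unfold pomozna
    rfl
  · rw [if_neg (by simpa using hn)]
    rw [bLoop_eq_flatMap_pomozna]
    simp [Int.toNat_of_nonneg hpre.1]
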